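-- pv_equiv track=rewrite | github.com/AnBoIms/Temustargram | models/craft/coordinates.py | group_by_y_coordinates
-- ===== SOURCE A (Python) =====
-- def group_by_y_coordinates(coords, y_threshold):
--     coords_sorted = sorted(coords, key=lambda c: c[0][1])
--     grouped = []
--     current_group = []
--
--     for coord in coords_sorted:
--         if not current_group:
--             current_group.append(coord)
--         else:
--             if len(grouped) == 4:
--                 current_group.append(coord)
--             else:
--                 prev_y = current_group[-1][0][1]
--                 curr_y = coord[0][1]
--                 if abs(curr_y - prev_y) <= y_threshold:
--                     current_group.append(coord)
--                 else:
--                     grouped.append(current_group)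
--                     current_group = [coord]
--
--     if current_group:
--         grouped.append(current_group)
--
--     if len(grouped) > 5:
--         extra_data = []
--         for extra_group in grouped[5:]:
--             extra_data.extend(extra_group)
--         grouped = grouped[:5]
--         grouped[4].extend(extra_data)
--
--     return grouped
-- ===== SOURCE B (Python) =====
-- def _run(prev, rest, y_threshold):
--     """Maximal run continuing `prev`: returns (run, remainder)."""
--     if rest and abs(rest[0][0][1] - prev[0][1]) <= y_threshold:
--         r, tail = _run(rest[0], rest[1:], y_threshold)
--         return [rest[0]] + r, tail
--     return [], rest
--
-- def _split(cs, y_threshold):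
--     """Split the sorted list into maximal threshold-runs, recursively."""
--     if not cs:
--         return []
--     run, rest = _run(cs[0], cs[1:], y_threshold)
--     return [[cs[0]] + run] + _split(rest, y_threshold)
--
-- def group_by_y_coordinates(coords, y_threshold):
--     groups = _split(sorted(coords, key=lambda c: c[0][1]), y_threshold)
--     if len(groups) > 4:
--         groups = groups[:4] + [[c for g in groups[4:] for c in g]]
--     return groups
-- ===== Notes on version B (the rewrite author's own statement) =====
-- stated objective: simpler
-- what changed: A's single stateful loop with an inline 'already have 4 groups' branch and a dead >5-groups fixup is replaced by a uniform recursive threshold-split into maximal runs followed by one post-pass that flattens every group past the 4th into the final fifth group.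
import Mathlib
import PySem

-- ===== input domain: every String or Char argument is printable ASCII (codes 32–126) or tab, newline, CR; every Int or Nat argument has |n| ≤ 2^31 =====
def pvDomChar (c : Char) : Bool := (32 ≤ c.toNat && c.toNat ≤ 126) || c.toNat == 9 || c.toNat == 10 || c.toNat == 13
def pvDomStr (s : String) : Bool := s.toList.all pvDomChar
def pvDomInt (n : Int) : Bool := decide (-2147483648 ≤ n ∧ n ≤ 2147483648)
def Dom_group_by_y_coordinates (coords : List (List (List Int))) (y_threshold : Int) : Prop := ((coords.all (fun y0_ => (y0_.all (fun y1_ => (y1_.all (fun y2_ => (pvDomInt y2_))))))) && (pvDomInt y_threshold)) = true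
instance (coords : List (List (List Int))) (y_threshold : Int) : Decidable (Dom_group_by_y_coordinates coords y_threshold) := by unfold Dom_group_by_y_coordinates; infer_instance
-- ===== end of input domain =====

-- B replaces A's stateful loop (with its inline "4 groups already" branch and dead >5 fixup)
-- by a uniform recursive split into maximal threshold-runs plus one merge post-pass; objective: simpler.

-- ===== PORT A =====
-- c[0][1]: exact on Pre_ (c nonempty and c[0] has ≥ 2 entries); the getD defaults are never read there.
def pvY (c : List (List Int)) : Int := PySem.List.pyGetD (PySem.List.pyGetD c 0 []) 1 0

def group_by_y_coordinates (coords : List (List (List Int))) (y_threshold : Int) : List (List (List (List Int))) :=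
  let coords_sorted := PySem.List.sorted coords (fun c => pvY c) false
  let st := coords_sorted.foldl
    (fun (s : List (List (List (List Int))) × List (List (List Int))) coord =>
      if s.2 = [] then (s.1, s.2 ++ [coord])
      else if s.1.length = 4 then (s.1, s.2 ++ [coord])
      else
        let prev_y := pvY (PySem.List.pyGetD s.2 (-1) [])
        let curr_y := pvY coord
        if |curr_y - prev_y| ≤ y_threshold then (s.1, s.2 ++ [coord])
        else (s.1 ++ [s.2], [coord]))
    ([], [])
  let grouped := if st.2 ≠ [] then st.1 ++ [st.2] else st.1
  if 5 < grouped.length then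
    let extra_data := (PySem.List.slice grouped (some 5) none).foldl (fun acc g => acc ++ g) []
    let grouped5 := PySem.List.slice grouped none (some 5)
    -- grouped[4].extend(extra_data): in-place update of index 4 (grouped5 has ≥ 5 entries here)
    grouped5.set 4 (grouped5.getD 4 [] ++ extra_data)
  else grouped

-- ===== PORT B =====
def pvRun (y_threshold : Int) (prev : List (List Int)) :
    List (List (List Int)) → List (List (List Int)) × List (List (List Int))
  | [] => ([], [])
  | x :: xs =>
      if |pvY x - pvY prev| ≤ y_threshold then
        let p := pvRun y_threshold x xs
        (x :: p.1, p.2)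
      else ([], x :: xs)

theorem pvRun_snd_length_le (t : Int) (prev : List (List Int)) (xs : List (List (List Int))) :
    (pvRun t prev xs).2.length ≤ xs.length := by
  induction xs generalizing prev with
  | nil => simp [pvRun]
  | cons x xs ih =>
      simp only [pvRun]
      split
      · exact le_trans (ih x) (Nat.le_succ _)
      · simp

def pvSplit (y_threshold : Int) : List (List (List Int)) → List (List (List (List Int)))
  | [] => []
  | c :: cs =>
      let p := pvRun y_threshold c cs
      ([c] ++ p.1) :: pvSplit y_threshold p.2
termination_by cs => cs.length
decreasing_by
  simpa using Nat.lt_succ_of_le (pvRun_snd_length_le y_threshold c cs)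

def group_by_y_coordinates_alt (coords : List (List (List Int))) (y_threshold : Int) : List (List (List (List Int))) :=
  let groups := pvSplit y_threshold (PySem.List.sorted coords (fun c => pvY c) false)
  if 4 < groups.length then
    PySem.List.slice groups none (some 4) ++ [(PySem.List.slice groups (some 4) none).flatMap (fun g => g)]
  else groups

-- ===== PRECONDITION & SPEC =====
-- Pre_: exactly where Python A returns — every coord c must have c[0][1] (c nonempty, c[0] of length ≥ 2),
-- otherwise the sort key raises IndexError (in both A and B).
def Pre_group_by_y_coordinates (coords : List (List (List Int))) (y_threshold : Int) : Prop :=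
  ∀ c ∈ coords, 1 ≤ c.length ∧ 2 ≤ (c.headD []).length
instance (coords : List (List (List Int))) (y_threshold : Int) : Decidable (Pre_group_by_y_coordinates coords y_threshold) := by unfold Pre_group_by_y_coordinates; infer_instance

def pvWitness_group_by_y_coordinates : List (List (List Int)) × Int :=
  ([[[0, 0], [3, 1]], [[2, 7]], [[1, 1]]], 2)

def Spec_group_by_y_coordinates (coords : List (List (List Int))) (y_threshold : Int) (out : List (List (List (List Int)))) : Prop := out = group_by_y_coordinates_alt coords y_threshold
instance (coords : List (List (List Int))) (y_threshold : Int) (out : List (List (List (List Int)))) : Decidable (Spec_group_by_y_coordinates coords y_threshold out) := by unfold Spec_group_by_y_coordinates; infer_instance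

-- ===== CLAIM (what is proved, stated in full; the proofs are below) =====
def Claim_equal_group_by_y_coordinates : Prop := ∀ (coords : List (List (List Int))) (y_threshold : Int), Dom_group_by_y_coordinates coords y_threshold → Pre_group_by_y_coordinates coords y_threshold → Spec_group_by_y_coordinates coords y_threshold (group_by_y_coordinates coords y_threshold)

-- ===== LEMMAS AND PROOFS =====

-- A's loop body, named for the proofs
def pvStepA (t : Int) (s : List (List (List (List Int))) × List (List (List Int)))
    (coord : List (List Int)) : List (List (List (List Int))) × List (List (List Int)) :=
  if s.2 = [] then (s.1, s.2 ++ [coord])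
  else if s.1.length = 4 then (s.1, s.2 ++ [coord])
  else
    let prev_y := pvY (PySem.List.pyGetD s.2 (-1) [])
    let curr_y := pvY coord
    if |curr_y - prev_y| ≤ t then (s.1, s.2 ++ [coord])
    else (s.1 ++ [s.2], [coord])

-- A's finalisation: append the pending group if nonempty
def pvFinA (st : List (List (List (List Int))) × List (List (List Int))) : List (List (List (List Int))) :=
  if st.2 ≠ [] then st.1 ++ [st.2] else st.1

-- B's merge post-pass, in take/drop form
def pvMergeB (gs : List (List (List (List Int)))) : List (List (List (List Int))) :=
  if 4 < gs.length then gs.take 4 ++ [(gs.drop 4).flatten] else gs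

theorem alt_eq_mergeB (coords : List (List (List Int))) (t : Int) :
    group_by_y_coordinates_alt coords t
      = pvMergeB (pvSplit t (PySem.List.sorted coords (fun c => pvY c) false)) := by
  unfold group_by_y_coordinates_alt pvMergeB
  simp [PySem.List.slice_to, PySem.List.slice_from, List.flatMap_id']

theorem pvRun_append (t : Int) (prev : List (List Int)) (xs : List (List (List Int))) :
    (pvRun t prev xs).1 ++ (pvRun t prev xs).2 = xs := by
  induction xs generalizing prev with
  | nil => simp [pvRun]
  | cons x xs ih =>
      simp only [pvRun]
      split
      · simpa using ih x
      · simp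

theorem pvSplit_flatten (t : Int) (cs : List (List (List Int))) :
    (pvSplit t cs).flatten = cs := by
  induction cs using pvSplit.induct t with
  | case1 => simp [pvSplit]
  | case2 c cs p ih =>
      rw [pvSplit]
      simp only [List.flatten_cons]
      rw [ih]
      simpa using pvRun_append t c cs

theorem pvMergeB_eq_self_of_le (gs : List (List (List (List Int)))) (h : gs.length ≤ 5) :
    pvMergeB gs = gs := by
  unfold pvMergeB
  split
  · rename_i h4
    match gs, h, h4 with
    | [a, b, c, d, e], _, _ => simp
  · rfl

theorem pvMergeB_length_le (gs : List (List (List (List Int)))) :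
    (pvMergeB gs).length ≤ 5 := by
  unfold pvMergeB
  split
  · simp only [List.length_append, List.length_take, List.length_cons, List.length_nil]
    omega
  · omega

-- A's loop once 4 groups are committed: everything joins the current group
theorem foldl_stepA_four (t : Int) (g : List (List (List (List Int))))
    (cur : List (List (List Int))) (hcur : cur ≠ []) (hg : g.length = 4)
    (xs : List (List (List Int))) :
    List.foldl (pvStepA t) (g, cur) xs = (g, cur ++ xs) := by
  induction xs generalizing cur with
  | nil => simp
  | cons x xs ih =>
      simp only [List.foldl_cons]
      rw [show pvStepA t (g, cur) x = (g, cur ++ [x]) by simp [pvStepA, hcur, hg]]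
      rw [ih (cur ++ [x]) (by simp)]
      simp

-- The main invariant: A's loop from (g, cur) finalized equals B's merge of g ++ the run-split continuation
theorem foldl_stepA_main (t : Int) (xs : List (List (List Int)))
    (g : List (List (List (List Int)))) (cur : List (List (List Int)))
    (l : List (List Int)) (hcur : cur ≠ []) (hl : cur.getLast hcur = l)
    (hg : g.length ≤ 4) :
    pvFinA (List.foldl (pvStepA t) (g, cur) xs)
      = pvMergeB (g ++ (cur ++ (pvRun t l xs).1) :: pvSplit t (pvRun t l xs).2) := by
  induction xs generalizing g cur l with
  | nil =>
      simp only [List.foldl_nil, pvRun, pvSplit]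
      rw [pvMergeB_eq_self_of_le _ (by simp; omega)]
      simp [pvFinA, hcur]
  | cons x xs ih =>
      by_cases h4 : g.length = 4
      · -- 4 groups committed: A appends everything to cur; B merges the whole tail
        simp only [List.foldl_cons]
        rw [show pvStepA t (g, cur) x = (g, cur ++ [x]) by simp [pvStepA, hcur, h4]]
        rw [foldl_stepA_four t g (cur ++ [x]) (by simp) h4 xs]
        rw [show pvFinA (g, cur ++ [x] ++ xs) = g ++ [cur ++ [x] ++ xs] by simp [pvFinA]]
        unfold pvMergeB
        have hlen : 4 < (g ++ (cur ++ (pvRun t l (x :: xs)).1) :: pvSplit t (pvRun t l (x :: xs)).2).length := by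
          simp; omega
        rw [if_pos hlen]
        have htake : (g ++ (cur ++ (pvRun t l (x :: xs)).1) :: pvSplit t (pvRun t l (x :: xs)).2).take 4 = g := by
          rw [List.take_append_of_le_length (by omega)]
          simp [List.take_of_length_le, h4]
        have hdrop : (g ++ (cur ++ (pvRun t l (x :: xs)).1) :: pvSplit t (pvRun t l (x :: xs)).2).drop 4 = (cur ++ (pvRun t l (x :: xs)).1) :: pvSplit t (pvRun t l (x :: xs)).2 := by
          rw [List.drop_append_of_le_length (by omega)]
          simp [List.drop_of_length_le, h4]
        rw [htake, hdrop]
        simp only [List.flatten_cons, pvSplit_flatten]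
        simp [pvRun_append]
      · -- fewer than 4 groups: A still grouping
        have hprev : pvY (PySem.List.pyGetD cur (-1) []) = pvY l := by
          rw [PySem.List.pyGetD_neg_one cur [] hcur, hl]
        simp only [List.foldl_cons]
        by_cases hclose : |pvY x - pvY l| ≤ t
        · rw [show pvStepA t (g, cur) x = (g, cur ++ [x]) by
            simp [pvStepA, hcur, h4, hprev, hclose]]
          rw [ih g (cur ++ [x]) x (by simp) (by simp) hg]
          simp only [pvRun, hclose, if_pos]
          simp
        · rw [show pvStepA t (g, cur) x = (g ++ [cur], [x]) by
            simp [pvStepA, hcur, h4, hprev, hclose]]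
          rw [ih (g ++ [cur]) [x] x (by simp) (by simp) (by simp; omega)]
          simp only [pvRun, hclose, if_false]
          rw [pvSplit]
          simp

theorem portA_finalize (t : Int) (c : List (List Int)) (cs : List (List (List Int))) :
    pvFinA (List.foldl (pvStepA t) ([], []) (c :: cs)) = pvMergeB (pvSplit t (c :: cs)) := by
  have h0 : List.foldl (pvStepA t) (([] : List (List (List (List Int)))), ([] : List (List (List Int)))) (c :: cs)
      = List.foldl (pvStepA t) ([], [c]) cs := by
    simp [pvStepA]
  rw [h0, pvSplit]
  have hmain := foldl_stepA_main t cs [] [c] c (by simp) (by simp) (by simp)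
  simpa using hmain

-- ===== VERDICT (by name: the statement is the Claim_ definition above) =====
theorem group_by_y_coordinates_spec : Claim_equal_group_by_y_coordinates := by
  intro coords t _hdom _hpre
  unfold Spec_group_by_y_coordinates
  rw [alt_eq_mergeB]
  unfold group_by_y_coordinates
  rw [show (fun (s : List (List (List (List Int))) × List (List (List Int))) coord =>
      if s.2 = [] then (s.1, s.2 ++ [coord])
      else if s.1.length = 4 then (s.1, s.2 ++ [coord])
      else
        let prev_y := pvY (PySem.List.pyGetD s.2 (-1) [])
        let curr_y := pvY coord
        if |curr_y - prev_y| ≤ t then (s.1, s.2 ++ [coord])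
        else (s.1 ++ [s.2], [coord])) = pvStepA t from rfl]
  cases PySem.List.sorted coords (fun c => pvY c) false with
  | nil => simp [pvSplit, pvMergeB]
  | cons c cs =>
      have hfin := portA_finalize t c cs
      have hle : (pvFinA (List.foldl (pvStepA t) ([], []) (c :: cs))).length ≤ 5 := by
        rw [hfin]; exact pvMergeB_length_le _
      rw [← hfin]
      simp only [pvFinA] at hle ⊢
      rw [if_neg (show ¬ 5 < _ by omega)]
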